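-- pv_equiv track=rewrite | github.com/zeyu-chen/25t1-comp9021-labs | Lab 6/Solutions/ex_2_sol.py | f2_2
-- ===== SOURCE A (Python) =====
-- def f2_2(L: list[list[int]], i: int, j: int, major: bool = True) -> int:
--     """
--     Calculates the sum of elements on a specified diagonal of a square matrix
--     that passes through the element at (i, j).
--
--     This version iterates through all elements of the matrix and checks
--     if each element belongs to the specified diagonal using mathematical conditions.
--
--     Args:
--         L: A square matrix represented as a list of lists of integers.
--         i: The 1-based row index of the element the diagonal passes through.
--         j: The 1-based column index of the element the diagonal passes through.
--         major: If True (default), calculate the sum of the major diagonal (NW-SE).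
--                If False, calculate the sum of the minor diagonal (SW-NE).
--
--     Returns:
--         The sum of the elements on the specified diagonal passing through (i, j).
--     """
--     size = len(L)  # Get the size of the square matrix.
--     the_sum = 0   # Initialize the sum.
--
--     # Convert 1-based input indices (i, j) to 0-based for calculations.
--     target_row_0based = i - 1
--     target_col_0based = j - 1
--
--     # Calculate the diagonal constants based on the target point (i, j).
--     if major:
--         # For the major diagonal, the difference (row - col) is constant.
--         diagonal_constant = target_row_0based - target_col_0based
--     else:
--         # For the minor diagonal, the sum (row + col) is constant.
--         diagonal_constant = target_row_0based + target_col_0based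
--
--     # Iterate through each cell (row, col) of the matrix using 0-based indices.
--     for row in range(size):
--         for col in range(size):
--             if major:
--                 # Check if the current cell lies on the target major diagonal.
--                 if row - col == diagonal_constant:
--                     the_sum += L[row][col]
--             else:
--                 # Check if the current cell lies on the target minor diagonal.
--                 if row + col == diagonal_constant:
--                     the_sum += L[row][col]
--
--     return the_sum
-- ===== SOURCE B (Python) =====
-- def f2_2(L: list[list[int]], i: int, j: int, major: bool = True) -> int:
--     # O(n): walk only the diagonal cells determined by the constant.
--     n = len(L)
--     c = (i - j) if major else (i + j - 2)
--     the_sum = 0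
--     for row in range(n):
--         col = row - c if major else c - row
--         if 0 <= col < n:
--             the_sum += L[row][col]
--     return the_sum
-- ===== Notes on version B (the rewrite author's own statement) =====
-- stated objective: alternative
-- what changed: B replaces A's nested scan over all cells of the matrix with a single pass over the rows, computing for each row the unique diagonal column from the diagonal constant and adding only that cell when it is in range.
import Mathlib
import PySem

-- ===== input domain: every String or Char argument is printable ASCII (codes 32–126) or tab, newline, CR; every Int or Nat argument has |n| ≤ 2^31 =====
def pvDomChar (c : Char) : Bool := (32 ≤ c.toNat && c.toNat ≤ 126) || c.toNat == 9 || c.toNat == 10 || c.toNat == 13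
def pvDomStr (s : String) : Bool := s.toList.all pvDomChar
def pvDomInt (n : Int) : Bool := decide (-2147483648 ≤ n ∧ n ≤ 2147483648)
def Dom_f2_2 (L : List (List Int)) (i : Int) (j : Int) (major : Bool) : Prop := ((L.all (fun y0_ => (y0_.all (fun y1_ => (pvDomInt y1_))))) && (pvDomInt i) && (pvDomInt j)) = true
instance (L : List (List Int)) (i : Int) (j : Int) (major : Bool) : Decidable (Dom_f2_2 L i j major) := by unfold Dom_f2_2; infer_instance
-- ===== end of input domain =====

-- B visits only the one diagonal cell per row given by the diagonal constant, in a single pass over rows, instead of A's scan over every cell.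

-- ===== PORT A =====
def f2_2 (L : List (List Int)) (i : Int) (j : Int) (major : Bool) : Int :=
  let size : Int := L.length
  let target_row_0based := i - 1
  let target_col_0based := j - 1
  let diagonal_constant : Int :=
    if major then target_row_0based - target_col_0based
    else target_row_0based + target_col_0based
  (PySem.List.pyRange 0 size 1).foldl (fun the_sum row =>
    (PySem.List.pyRange 0 size 1).foldl (fun the_sum col =>
      if major then
        if row - col = diagonal_constant then
          -- L[row][col]; in range under Pre_f2_2
          the_sum + PySem.List.pyGetD (PySem.List.pyGetD L row []) col 0
        else the_sum
      else
        if row + col = diagonal_constant then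
          the_sum + PySem.List.pyGetD (PySem.List.pyGetD L row []) col 0
        else the_sum) the_sum) 0

-- ===== PORT B =====
def f2_2_alt (L : List (List Int)) (i : Int) (j : Int) (major : Bool) : Int :=
  let n : Int := L.length
  let c : Int := if major then i - j else i + j - 2
  (PySem.List.pyRange 0 n 1).foldl (fun the_sum row =>
    let col : Int := if major then row - c else c - row
    if 0 ≤ col ∧ col < n then
      -- L[row][col]; in range under Pre_f2_2
      the_sum + PySem.List.pyGetD (PySem.List.pyGetD L row []) col 0
    else the_sum) 0

-- ===== PRECONDITION & SPEC =====
-- Pre_ excludes exactly the ragged matrices on which Python A (and B alike) raises IndexError: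
-- a row shorter than the diagonal column it would have to provide.
def Pre_f2_2 (L : List (List Int)) (i : Int) (j : Int) (major : Bool) : Prop :=
  ∀ r ∈ List.range L.length,
    (let col : Int := if major then (r : Int) - (i - j) else (i + j - 2) - (r : Int)
     (0 ≤ col ∧ col < (L.length : Int)) → col < ((L.getD r []).length : Int))
instance (L : List (List Int)) (i : Int) (j : Int) (major : Bool) : Decidable (Pre_f2_2 L i j major) := by
  unfold Pre_f2_2; infer_instance
def pvWitness_f2_2 : List (List Int) × Int × Int × Bool := ([[1, 2], [3, 4]], 1, 2, true)

def Spec_f2_2 (L : List (List Int)) (i : Int) (j : Int) (major : Bool) (out : Int) : Prop := out = f2_2_alt L i j major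
instance (L : List (List Int)) (i : Int) (j : Int) (major : Bool) (out : Int) : Decidable (Spec_f2_2 L i j major out) := by unfold Spec_f2_2; infer_instance

-- ===== CLAIM (what is proved, stated in full; the proofs are below) =====
def Claim_equal_f2_2 : Prop := ∀ (L : List (List Int)) (i : Int) (j : Int) (major : Bool), Dom_f2_2 L i j major → Pre_f2_2 L i j major → Spec_f2_2 L i j major (f2_2 L i j major)

-- ===== LEMMAS AND PROOFS =====

-- Folding a "pick out one element" step over a list not containing it leaves the accumulator.
theorem foldl_pick_skip (g : Int → Int) (P : Int → Prop) [DecidablePred P] (t : Int)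
    (hP : ∀ x, P x ↔ x = t) :
    ∀ (l : List Int) (s : Int), t ∉ l →
      l.foldl (fun s x => if P x then s + g x else s) s = s := by
  intro l
  induction l with
  | nil => intro s _; rfl
  | cons x xs ih =>
    intro s ht
    simp only [List.foldl_cons]
    have hx : ¬ P x := by
      rw [hP]; intro h; exact ht (h ▸ List.mem_cons_self)
    rw [if_neg hx]
    exact ih s (fun h => ht (List.mem_cons_of_mem _ h))

-- Folding it over a duplicate-free list adds exactly the one matching term (if present).
theorem foldl_pick_single (g : Int → Int) (P : Int → Prop) [DecidablePred P] (t : Int)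
    (hP : ∀ x, P x ↔ x = t) :
    ∀ (l : List Int), l.Nodup → ∀ s : Int,
      l.foldl (fun s x => if P x then s + g x else s) s = s + (if t ∈ l then g t else 0) := by
  intro l
  induction l with
  | nil => intro _ s; simp
  | cons x xs ih =>
    intro hnd s
    obtain ⟨hx, hxs⟩ := List.nodup_cons.mp hnd
    simp only [List.foldl_cons]
    by_cases hxt : x = t
    · subst hxt
      rw [if_pos ((hP x).mpr rfl)]
      rw [foldl_pick_skip g P x hP xs _ hx]
      simp
    · rw [if_neg (fun h => hxt ((hP x).mp h))]
      rw [ih hxs s]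
      have htx : t ≠ x := fun h => hxt h.symm
      simp [List.mem_cons, htx]

-- ===== VERDICT (by name: the statement is the Claim_ definition above) =====
theorem f2_2_spec : Claim_equal_f2_2 := by
  intro L i j major _ _
  unfold Spec_f2_2
  cases major with
  | true =>
    show f2_2 L i j true = f2_2_alt L i j true
    simp only [f2_2, f2_2_alt, if_true]
    congr 1
    funext s row
    rw [foldl_pick_single (fun col => PySem.List.pyGetD (PySem.List.pyGetD L row []) col 0)
      (fun col => row - col = i - 1 - (j - 1)) (row - (i - j)) (by intro x; omega)
      _ (PySem.List.nodup_pyRange_one 0 (L.length : Int)) s]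
    simp only [PySem.List.mem_pyRange_one]
    split_ifs <;> simp
  | false =>
    show f2_2 L i j false = f2_2_alt L i j false
    simp only [f2_2, f2_2_alt, if_false, Bool.false_eq_true]
    congr 1
    funext s row
    rw [foldl_pick_single (fun col => PySem.List.pyGetD (PySem.List.pyGetD L row []) col 0)
      (fun col => row + col = i - 1 + (j - 1)) (i + j - 2 - row) (by intro x; omega)
      _ (PySem.List.nodup_pyRange_one 0 (L.length : Int)) s]
    simp only [PySem.List.mem_pyRange_one]
    split_ifs <;> simp
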